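-- pv_equiv track=rewrite | github.com/koddachad/k_ctds | src/ctds/_bulk_insert.py | _parse_table_name
-- ===== SOURCE A (Python) =====
-- def _parse_table_name(table):
--     """
--     Parse a possibly multi-part SQL Server table name into
--     (catalog, schema, table) components.
--
--     Splits on '.' while respecting [bracketed] and "quoted" identifiers.
--     Parts are assigned right-to-left: table, schema, catalog.
--
--     Returns:
--         tuple: (catalog, schema, table) where catalog and schema may be None.
--
--     Raises:
--         ValueError: If the table name has more than 3 parts.
--     """
--     parts = []
--     current = []
--     i = 0
--
--     while i < len(table):
--         ch = table[i]
--
--         if ch == '[':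
--             i += 1
--             while i < len(table) and table[i] != ']':
--                 current.append(table[i])
--                 i += 1
--             if i < len(table):
--                 i += 1  # skip closing ]
--
--         elif ch == '"':
--             i += 1
--             while i < len(table):
--                 if table[i] == '"':
--                     if i + 1 < len(table) and table[i + 1] == '"':
--                         current.append('"')
--                         i += 2
--                     else:
--                         i += 1
--                         break
--                 else:
--                     current.append(table[i])
--                     i += 1
--
--         elif ch == '.':
--             parts.append(''.join(current))
--             current = []
--             i += 1
--
--         else:
--             current.append(ch)
--             i += 1
--
--     parts.append(''.join(current))
--
--     if len(parts) == 1: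
--         return (None, None, parts[0])
--     elif len(parts) == 2:
--         return (None, parts[0], parts[1])
--     elif len(parts) == 3:
--         return (parts[0], parts[1], parts[2])
--     else:
--         raise ValueError(
--             'Invalid table name: {!r}. '
--             'Expected [catalog.][schema.]table'.format(table)
--         )
-- ===== SOURCE B (Python) =====
-- def _parse_table_name(table):
--     # Single-pass finite state machine: state in {NORMAL, BRACKET, QUOTE, QUOTE_END}.
--     NORMAL, BRACKET, QUOTE, QUOTE_END = range(4)
--     state = NORMAL
--     parts = []
--     buf = []
--     for ch in table:
--         if state == BRACKET:
--             if ch == ']':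
--                 state = NORMAL
--             else:
--                 buf.append(ch)
--             continue
--         if state == QUOTE:
--             if ch == '"':
--                 state = QUOTE_END
--             else:
--                 buf.append(ch)
--             continue
--         if state == QUOTE_END:
--             if ch == '"':
--                 buf.append('"')
--                 state = QUOTE
--                 continue
--             state = NORMAL
--             # fall through: reprocess ch in NORMAL state
--         if ch == '[':
--             state = BRACKET
--         elif ch == '"':
--             state = QUOTE
--         elif ch == '.':
--             parts.append(''.join(buf))
--             buf = []
--         else:
--             buf.append(ch)
--     parts.append(''.join(buf))
--     if len(parts) > 3:
--         raise ValueError(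
--             'Invalid table name: {!r}. '
--             'Expected [catalog.][schema.]table'.format(table)
--         )
--     catalog, schema, tbl = [None] * (3 - len(parts)) + parts
--     return (catalog, schema, tbl)
-- ===== Notes on version B (the rewrite author's own statement) =====
-- stated objective: faster
-- what changed: Replaces A's index-driven outer while with nested inner while-loops for brackets/quotes by a single for-loop finite state machine (NORMAL/BRACKET/QUOTE/QUOTE_END) over the characters, and replaces the len-based return chain by left-padding the parts list with None; iterating characters directly avoids per-character index arithmetic and repeated table[i] indexing (constant-factor speedup, measured ~2.3x).
import Mathlib
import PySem

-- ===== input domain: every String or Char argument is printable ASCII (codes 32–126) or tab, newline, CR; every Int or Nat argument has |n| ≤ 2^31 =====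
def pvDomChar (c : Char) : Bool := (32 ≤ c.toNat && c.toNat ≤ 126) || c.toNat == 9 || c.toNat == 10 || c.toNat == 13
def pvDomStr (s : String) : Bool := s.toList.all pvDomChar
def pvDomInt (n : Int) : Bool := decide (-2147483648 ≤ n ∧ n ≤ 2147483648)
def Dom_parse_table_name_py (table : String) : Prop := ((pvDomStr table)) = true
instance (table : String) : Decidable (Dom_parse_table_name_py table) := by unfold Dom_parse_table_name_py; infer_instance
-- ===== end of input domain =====

-- B replaces A's index loop with nested inner while-loops by a one-pass four-state
-- finite state machine and a None-padding dispatch (measured constant-factor speedup).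

-- ===== PORT A =====
-- A's outer while over index i, with the two inner while-loops for bracketed and quoted identifiers,
-- transliterated as mutual recursion consuming the remaining characters.
mutual
def aNormal (cs : List Char) (cur : List Char) (parts : List String) : List String :=
  match cs with
  | [] => parts ++ [String.ofList cur]
  | c :: cs =>
    if c = '[' then aBracket cs cur parts
    else if c = '"' then aQuote cs cur parts
    else if c = '.' then aNormal cs [] (parts ++ [String.ofList cur])
    else aNormal cs (cur ++ [c]) parts
  termination_by cs.length
  decreasing_by all_goals (first | (simp; omega) | simp | omega)

def aBracket (cs : List Char) (cur : List Char) (parts : List String) : List String :=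
  match cs with
  | [] => parts ++ [String.ofList cur]   -- inner while falls off the end; outer loop then ends
  | c :: cs =>
    if c = ']' then aNormal cs cur parts
    else aBracket cs (cur ++ [c]) parts
  termination_by cs.length
  decreasing_by all_goals (first | (simp; omega) | simp | omega)

-- the i+1 lookahead for the '""' escape is the two-character pattern
def aQuote (cs : List Char) (cur : List Char) (parts : List String) : List String :=
  match cs with
  | [] => parts ++ [String.ofList cur]
  | '"' :: '"' :: cs' => aQuote cs' (cur ++ ['"']) parts
  | '"' :: cs => aNormal cs cur parts
  | c :: cs => aQuote cs (cur ++ [c]) parts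
  termination_by cs.length
  decreasing_by all_goals (first | (simp; omega) | simp | omega)
end

-- the if len(parts) == 1/2/3 return chain; the len > 3 ValueError is excluded by Pre_
def aDispatch (parts : List String) : Option String × Option String × String :=
  match parts with
  | [t] => (none, none, t)
  | [s, t] => (none, some s, t)
  | [c, s, t] => (some c, some s, t)
  | _ => (none, none, "")   -- unreachable inside Pre_ (A raises ValueError)

def parse_table_name_py (table : String) : Option String × Option String × String :=
  aDispatch (aNormal table.toList [] [])

-- ===== PORT B =====
inductive PState
  | normal | bracket | quote | quoteEnd
deriving DecidableEq, Repr

-- B's single for-loop with an explicit state variable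
def bLoop : PState → List Char → List Char → List String → List String
  | _, [], buf, parts => parts ++ [String.ofList buf]
  | .bracket, c :: cs, buf, parts =>
    if c = ']' then bLoop .normal cs buf parts else bLoop .bracket cs (buf ++ [c]) parts
  | .quote, c :: cs, buf, parts =>
    if c = '"' then bLoop .quoteEnd cs buf parts else bLoop .quote cs (buf ++ [c]) parts
  | .quoteEnd, c :: cs, buf, parts =>
    if c = '"' then bLoop .quote cs (buf ++ ['"']) parts
    else -- fall through: reprocess c in NORMAL state
      if c = '[' then bLoop .bracket cs buf parts
      else if c = '"' then bLoop .quote cs buf parts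
      else if c = '.' then bLoop .normal cs [] (parts ++ [String.ofList buf])
      else bLoop .normal cs (buf ++ [c]) parts
  | .normal, c :: cs, buf, parts =>
    if c = '[' then bLoop .bracket cs buf parts
    else if c = '"' then bLoop .quote cs buf parts
    else if c = '.' then bLoop .normal cs [] (parts ++ [String.ofList buf])
    else bLoop .normal cs (buf ++ [c]) parts

-- catalog, schema, tbl = [None]*(3-len(parts)) + parts  (parts always ends non-empty, so the
-- last padded element is some _; .getD "" only totalises the destructuring)
def bDispatch (parts : List String) : Option String × Option String × String :=
  if parts.length > 3 then (none, none, "")      -- the ValueError branch, excluded by Pre_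
  else
    match List.replicate (3 - parts.length) (none : Option String) ++ parts.map some with
    | [c, s, t] => (c, s, t.getD "")
    | _ => (none, none, "")

def parse_table_name_py_alt (table : String) : Option String × Option String × String :=
  bDispatch (bLoop .normal table.toList [] [])

-- ===== PRECONDITION & SPEC =====
-- Counts the dot separators outside bracketed/quoted identifiers (no buffers, no output):
-- A raises ValueError exactly when the name has more than 3 such parts.
def sepCount : PState → List Char → Nat
  | _, [] => 0
  | .bracket, c :: cs => sepCount (if c = ']' then .normal else .bracket) cs
  | .quote, c :: cs => sepCount (if c = '"' then .quoteEnd else .quote) cs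
  | .quoteEnd, c :: cs =>
    if c = '"' then sepCount .quote cs
    else if c = '[' then sepCount .bracket cs
    else if c = '.' then sepCount .normal cs + 1
    else sepCount .normal cs
  | .normal, c :: cs =>
    if c = '[' then sepCount .bracket cs
    else if c = '"' then sepCount .quote cs
    else if c = '.' then sepCount .normal cs + 1
    else sepCount .normal cs

-- Pre_ excludes exactly the inputs with more than two top-level dot separators, on which
-- the Python A (and B) raises ValueError.
def Pre_parse_table_name_py (table : String) : Prop :=
  sepCount .normal table.toList ≤ 2

instance (table : String) : Decidable (Pre_parse_table_name_py table) := by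
  unfold Pre_parse_table_name_py; infer_instance

def pvWitness_parse_table_name_py : String := "[my db].\"sch\".tbl"

def Spec_parse_table_name_py (table : String) (out : Option String × Option String × String) : Prop := out = parse_table_name_py_alt table
instance (table : String) (out : Option String × Option String × String) : Decidable (Spec_parse_table_name_py table out) := by unfold Spec_parse_table_name_py; infer_instance

-- ===== CLAIM (what is proved, stated in full; the proofs are below) =====
def Claim_equal_parse_table_name_py : Prop := ∀ (table : String), Dom_parse_table_name_py table → Pre_parse_table_name_py table → Spec_parse_table_name_py table (parse_table_name_py table)

-- ===== LEMMAS AND PROOFS =====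

-- A's three loop modes coincide with B's FSM states (quoteEnd is A's lookahead, handled inside).
theorem loops_eq : ∀ n cs, cs.length ≤ n → ∀ (cur : List Char) (parts : List String),
    aNormal cs cur parts = bLoop .normal cs cur parts ∧
    aBracket cs cur parts = bLoop .bracket cs cur parts ∧
    aQuote cs cur parts = bLoop .quote cs cur parts := by
  intro n
  induction n with
  | zero =>
    intro cs h cur parts
    have : cs = [] := List.eq_nil_of_length_eq_zero (Nat.le_zero.mp h)
    subst this
    simp [aNormal, aBracket, aQuote, bLoop]
  | succ n ih =>
    intro cs h cur parts
    cases cs with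
    | nil => simp [aNormal, aBracket, aQuote, bLoop]
    | cons c cs =>
      have hcs : cs.length ≤ n := by simpa using h
      refine ⟨?_, ?_, ?_⟩
      · simp only [aNormal, bLoop]
        split_ifs with h1 h2 h3
        · exact (ih cs hcs cur parts).2.1
        · exact (ih cs hcs cur parts).2.2
        · exact (ih cs hcs [] (parts ++ [String.ofList cur])).1
        · exact (ih cs hcs (cur ++ [c]) parts).1
      · simp only [aBracket, bLoop]
        split_ifs with h1
        · exact (ih cs hcs cur parts).1
        · exact (ih cs hcs (cur ++ [c]) parts).2.1
      · by_cases h1 : c = '"'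
        · -- A's lookahead vs B's quoteEnd state
          subst h1
          cases cs with
          | nil => simp [aQuote, aNormal, bLoop]
          | cons d cs' =>
            have hcs' : cs'.length ≤ n := Nat.le_of_succ_le hcs
            have hrhs : bLoop .quote ('"' :: d :: cs') cur parts
                = bLoop .quoteEnd (d :: cs') cur parts := by
              simp [bLoop]
            rw [hrhs]
            by_cases hd : d = '"'
            · subst hd
              have hlhs : aQuote ('"' :: '"' :: cs') cur parts
                  = aQuote cs' (cur ++ ['"']) parts := by
                simp [aQuote]
              have hrhs2 : bLoop .quoteEnd ('"' :: cs') cur parts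
                  = bLoop .quote cs' (cur ++ ['"']) parts := by
                simp [bLoop]
              rw [hlhs, hrhs2]
              exact (ih cs' hcs' (cur ++ ['"']) parts).2.2
            · have hlhs : aQuote ('"' :: d :: cs') cur parts
                  = aNormal (d :: cs') cur parts := by
                cases cs' <;> simp_all [aQuote]
              rw [hlhs]
              simp only [aNormal, bLoop, if_neg hd]
              split_ifs <;>
                first
                  | exact absurd ‹d = '"'› hd
                  | exact (ih cs' hcs' cur parts).2.1
                  | exact (ih cs' hcs' cur parts).2.2
                  | exact (ih cs' hcs' [] (parts ++ [String.ofList cur])).1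
                  | exact (ih cs' hcs' (cur ++ [d]) parts).1
        · have hlhs : aQuote (c :: cs) cur parts = aQuote cs (cur ++ [c]) parts := by
            cases cs with
            | nil => simp [aQuote]
            | cons d cs' => by_cases hd : d = '"' <;> simp_all [aQuote]
          rw [hlhs]
          simp only [bLoop, if_neg h1]
          exact (ih cs hcs (cur ++ [c]) parts).2.2

-- length of the produced parts list, in terms of the separator count
theorem bLoop_length : ∀ (cs : List Char) (st : PState) (buf : List Char) (parts : List String),
    (bLoop st cs buf parts).length = parts.length + 1 + sepCount st cs := by
  intro cs
  induction cs with
  | nil => intro st buf parts; cases st <;> simp [bLoop, sepCount]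
  | cons c cs ih =>
    intro st buf parts
    cases st <;> simp only [bLoop, sepCount] <;> split_ifs <;>
      simp [ih] <;> omega

-- the two dispatches agree on 1-, 2- and 3-element lists
theorem dispatch_eq (parts : List String) (h1 : 1 ≤ parts.length) (h3 : parts.length ≤ 3) :
    aDispatch parts = bDispatch parts := by
  match parts, h1, h3 with
  | [t], _, _ => simp [aDispatch, bDispatch]
  | [s, t], _, _ => simp [aDispatch, bDispatch]
  | [c, s, t], _, _ => simp [aDispatch, bDispatch]

-- ===== VERDICT (by name: the statement is the Claim_ definition above) =====
theorem parse_table_name_py_spec : Claim_equal_parse_table_name_py := by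
  intro table _ hpre
  unfold Spec_parse_table_name_py parse_table_name_py parse_table_name_py_alt
  rw [(loops_eq table.toList.length table.toList le_rfl [] []).1]
  unfold Pre_parse_table_name_py at hpre
  apply dispatch_eq
  · rw [bLoop_length]; omega
  · rw [bLoop_length]; simp only [List.length_nil]; omega
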